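-- pv_equiv track=rewrite | github.com/Matteo-Candi/Master-Thesis | benchmark/Python_formatted.py | is_odd_length
-- ===== SOURCE A (Python) =====
-- def is_odd_length(num):
--     count = 0
--     while num > 0:
--         num = num // 10
--         count += 1
--     if count % 2 != 0:
--         return True
--     return False
-- ===== SOURCE B (Python) =====
-- def is_odd_length(num):
--     return num > 0 and len(str(num)) % 2 == 1
-- ===== Notes on version B (the rewrite author's own statement) =====
-- stated objective: idiomatic
-- what changed: Replaces the divide-by-10 counting loop with a direct digit count via len(str(num)), guarded by num > 0 which matches A's result for non-positive inputs, where A's loop never runs.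
import Mathlib
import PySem

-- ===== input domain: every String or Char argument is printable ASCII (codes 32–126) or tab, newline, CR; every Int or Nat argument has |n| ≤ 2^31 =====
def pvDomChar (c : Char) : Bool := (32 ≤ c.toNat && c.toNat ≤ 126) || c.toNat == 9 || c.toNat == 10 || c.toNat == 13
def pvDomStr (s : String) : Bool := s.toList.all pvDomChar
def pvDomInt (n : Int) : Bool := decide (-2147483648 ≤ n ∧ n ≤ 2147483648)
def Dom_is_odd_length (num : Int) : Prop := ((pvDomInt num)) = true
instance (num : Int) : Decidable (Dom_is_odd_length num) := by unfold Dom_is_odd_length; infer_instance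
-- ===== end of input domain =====

-- B replaces A's divide-by-10 counting loop with len(str(num)); guard num > 0 matches A's loop-never-runs case for non-positive inputs.

-- ===== PORT A =====
-- the while loop: num //= 10, count += 1 while num > 0
def isOddLoopA (num : Int) (count : Int) : Int :=
  if h : num > 0 then isOddLoopA (PySem.Int.floordiv num 10) (count + 1) else count
termination_by num.toNat
decreasing_by
  rw [PySem.Int.floordiv_eq_ediv_of_pos (by omega : (0:Int) < 10)]
  omega

def is_odd_length (num : Int) : Bool :=
  if PySem.Int.mod (isOddLoopA num 0) 2 ≠ 0 then true else false

-- ===== PORT B =====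
def is_odd_length_alt (num : Int) : Bool :=
  decide (num > 0) && decide (PySem.Int.mod (PySem.Str.len (PySem.Int.toStr num)) 2 = 1)

-- ===== PRECONDITION & SPEC =====
def Spec_is_odd_length (num : Int) (out : Bool) : Prop := out = is_odd_length_alt num
instance (num : Int) (out : Bool) : Decidable (Spec_is_odd_length num out) := by unfold Spec_is_odd_length; infer_instance

-- ===== CLAIM (what is proved, stated in full; the proofs are below) =====
def Claim_equal_is_odd_length : Prop := ∀ (num : Int), Dom_is_odd_length num → Spec_is_odd_length num (is_odd_length num)

-- ===== LEMMAS AND PROOFS =====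

-- A's loop counts exactly the decimal digits of a positive number
theorem isOddLoopA_eq_digits (m : Nat) (hm : 0 < m) :
    ∀ (c : Int), isOddLoopA (m : Int) c = c + ((Nat.toDigits 10 m).length : Int) := by
  induction m using Nat.strong_induction_on with
  | _ m ih =>
    intro c
    rw [isOddLoopA]
    have h10 : (0:Int) < 10 := by omega
    simp only [show ((m:Int) > 0) from by exact_mod_cast hm, dite_true]
    rw [PySem.Int.floordiv_eq_ediv_of_pos h10]
    have hdiv : (m : Int) / 10 = ((m / 10 : Nat) : Int) := by
      exact_mod_cast (Int.natCast_div m 10).symm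
    rw [hdiv]
    rw [Nat.toDigits_eq_if (by omega : 1 < 10)]
    by_cases hlt : m < 10
    · have h0 : m / 10 = 0 := Nat.div_eq_of_lt hlt
      rw [h0]
      rw [isOddLoopA]
      simp [hlt]
    · have hpos : 0 < m / 10 := Nat.div_pos (by omega) (by omega)
      rw [ih (m / 10) (Nat.div_lt_self hm (by omega)) hpos (c + 1)]
      simp [hlt, List.length_append]
      ring

theorem isOddLoopA_nonpos (num : Int) (h : ¬ num > 0) : isOddLoopA num 0 = 0 := by
  rw [isOddLoopA]; simp [h]

theorem is_odd_length_spec : Claim_equal_is_odd_length := by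
  intro num _
  unfold Spec_is_odd_length is_odd_length is_odd_length_alt
  by_cases hpos : num > 0
  · have hm : 0 < num.toNat := by omega
    have hnum : (num.toNat : Int) = num := by omega
    have hloop : isOddLoopA num 0 = ((Nat.toDigits 10 num.toNat).length : Int) := by
      have := isOddLoopA_eq_digits num.toNat hm 0
      rw [hnum] at this
      simpa using this
    have hlen : PySem.Str.len (PySem.Int.toStr num) = ((Nat.toDigits 10 num.toNat).length : Int) := by
      rw [PySem.Str.len_eq, PySem.Int.toList_toStr]
      unfold PySem.Int.toChars
      simp [show ¬ num < 0 by omega]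
    rw [hloop, hlen]
    have hmod := PySem.Int.mod_eq_emod_of_pos (a := ((Nat.toDigits 10 num.toNat).length : Int)) (b := 2) (by omega)
    rw [hmod]
    simp [hpos]
  · rw [isOddLoopA_nonpos num hpos]
    simp [hpos, PySem.Int.mod]
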